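-- pv_equiv track=rewrite | github.com/jheikkila42/sea_watch | sea_watch_10.py | get_work_blocks
-- ===== SOURCE A (Python) =====
-- def get_work_blocks(work_slots):
--     """Palauttaa työblokit listana (start_slot, end_slot)."""
--     blocks = []
--     start = None
--
--     for i, w in enumerate(work_slots):
--         if w and start is None:
--             start = i
--         elif not w and start is not None:
--             blocks.append((start, i))
--             start = None
--
--     if start is not None:
--         blocks.append((start, 48))
--
--     return blocks
-- ===== SOURCE B (Python) =====
-- def get_work_blocks(work_slots):
--     """Palauttaa tyoblokit listana (start_slot, end_slot)."""
--     blocks = []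
--     n = len(work_slots)
--     i = 0
--     while i < n:
--         if work_slots[i]:
--             j = i
--             while j < n and work_slots[j]:
--                 j += 1
--             blocks.append((i, 48 if j == n else j))
--             i = j
--         else:
--             i += 1
--     return blocks
-- ===== Notes on version B (the rewrite author's own statement) =====
-- stated objective: alternative
-- what changed: Replaces the start/None state-machine scan with a two-pointer run scanner: an outer loop finds the start of each truthy run and an inner loop jumps to its end, emitting one block per run (the trailing run ending at the list end keeps the sentinel end 48).
import Mathlib
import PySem

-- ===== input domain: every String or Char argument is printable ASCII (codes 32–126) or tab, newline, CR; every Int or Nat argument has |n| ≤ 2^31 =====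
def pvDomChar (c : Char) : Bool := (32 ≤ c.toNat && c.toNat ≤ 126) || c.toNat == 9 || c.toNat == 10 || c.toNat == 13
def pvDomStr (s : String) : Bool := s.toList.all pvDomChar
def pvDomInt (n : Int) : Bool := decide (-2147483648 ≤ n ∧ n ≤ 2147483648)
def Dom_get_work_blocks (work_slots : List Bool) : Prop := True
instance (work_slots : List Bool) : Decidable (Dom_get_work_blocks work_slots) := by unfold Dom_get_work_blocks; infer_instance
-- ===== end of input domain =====

-- B replaces A's start/None state-machine scan by a two-pointer run scanner (same cost, different decomposition).


-- ===== PORT A =====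
-- the for-loop over enumerate(work_slots) with state (blocks, start)
def pvALoop : List (Int × Bool) → List (Int × Int) → Option Int → List (Int × Int) × Option Int
  | [], blocks, start => (blocks, start)
  | (i, w) :: rest, blocks, start =>
    if w && start.isNone then pvALoop rest blocks (some i)
    else if !w && start.isSome then pvALoop rest (blocks ++ [(start.getD 0, i)]) none
    else pvALoop rest blocks start

def get_work_blocks (work_slots : List Bool) : List (Int × Int) :=
  let st := pvALoop (PySem.List.enumerate work_slots) [] none
  match st.2 with
  | none => st.1
  | some s => st.1 ++ [(s, 48)]

-- ===== PORT B =====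
-- inner while loop: advance j while j < n and work_slots[j]
def pvBInner (ws : List Bool) (n j : Nat) : Nat :=
  if j < n ∧ ws.getD j false then pvBInner ws n (j + 1) else j
termination_by n - j

-- needed by pvBLoop's decreasing_by: the inner scan never moves left
theorem pvBInner_ge (ws : List Bool) (n j : Nat) : j ≤ pvBInner ws n j := by
  fun_induction pvBInner with
  | case1 j h ih => omega
  | case2 j h => exact Nat.le_refl j

-- outer while loop on index i
def pvBLoop (ws : List Bool) (n i : Nat) : List (Int × Int) :=
  if _h : i < n then
    if hw : ws.getD i false then
      let j := pvBInner ws n i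
      ((i : Int), if j = n then (48 : Int) else (j : Int)) :: pvBLoop ws n j
    else pvBLoop ws n (i + 1)
  else []
termination_by n - i
decreasing_by
  · have : i < pvBInner ws n i := by
      rw [pvBInner, if_pos ⟨_h, hw⟩]
      exact Nat.lt_of_lt_of_le (Nat.lt_succ_self i) (pvBInner_ge ws n (i + 1))
    omega
  · omega

def get_work_blocks_alt (work_slots : List Bool) : List (Int × Int) :=
  pvBLoop work_slots work_slots.length 0

-- ===== PRECONDITION & SPEC =====
def Spec_get_work_blocks (work_slots : List Bool) (out : List (Int × Int)) : Prop := out = get_work_blocks_alt work_slots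
instance (work_slots : List Bool) (out : List (Int × Int)) : Decidable (Spec_get_work_blocks work_slots out) := by unfold Spec_get_work_blocks; infer_instance

-- ===== CLAIM (what is proved, stated in full; the proofs are below) =====
def Claim_equal_get_work_blocks : Prop := ∀ (work_slots : List Bool), Dom_get_work_blocks work_slots → Spec_get_work_blocks work_slots (get_work_blocks work_slots)

-- ===== LEMMAS AND PROOFS =====

-- A's final step: append the trailing (start, 48) block if a run is still open
def pvFinish (p : List (Int × Int) × Option Int) : List (Int × Int) :=
  match p.2 with
  | none => p.1
  | some s => p.1 ++ [(s, 48)]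

theorem pvALoop_acc (e : List (Int × Bool)) (bs : List (Int × Int)) (st : Option Int) :
    pvALoop e bs st = (bs ++ (pvALoop e [] st).1, (pvALoop e [] st).2) := by
  induction e generalizing bs st with
  | nil => simp [pvALoop]
  | cons p rest ih =>
    obtain ⟨i, w⟩ := p
    simp only [pvALoop]
    split_ifs with h1 h2
    · exact ih bs (some i)
    · simp only [List.nil_append]
      rw [ih (bs ++ [(st.getD 0, i)]) none, ih [(st.getD 0, i)] none]
      simp
    · exact ih bs st

theorem pvFinish_acc (e : List (Int × Bool)) (bs : List (Int × Int)) (st : Option Int) :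
    pvFinish (pvALoop e bs st) = bs ++ pvFinish (pvALoop e [] st) := by
  rw [pvALoop_acc]
  unfold pvFinish
  cases (pvALoop e [] st).2 <;> simp

theorem pvGetElem_of_drop {ws : List Bool} {i : Nat} {x : Bool} {rest : List Bool}
    (h : ws.drop i = x :: rest) : ws[i]? = some x := by
  have h0 : ws[i]? = (ws.drop i)[0]? := by simp [List.getElem?_drop]
  rw [h0, h]
  rfl

theorem pvDrop_succ_of_drop {ws : List Bool} {i : Nat} {x : Bool} {rest : List Bool}
    (h : ws.drop i = x :: rest) : ws.drop (i + 1) = rest := by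
  have : ws.drop (i + 1) = (ws.drop i).drop 1 := by
    rw [← List.drop_drop]
  rw [this, h]
  rfl

theorem pvLt_of_drop {ws : List Bool} {i : Nat} {x : Bool} {rest : List Bool}
    (h : ws.drop i = x :: rest) : i < ws.length := by
  have := congrArg List.length h
  simp [List.length_drop] at this
  omega

theorem pvBInner_stop (ws : List Bool) (n j : Nat) (h : ¬ (j < n ∧ ws.getD j false)) :
    pvBInner ws n j = j := by
  rw [pvBInner, if_neg h]

theorem pvBInner_step (ws : List Bool) (n j : Nat) (h1 : j < n) (h2 : ws.getD j false) :
    pvBInner ws n j = pvBInner ws n (j + 1) := by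
  rw [pvBInner, if_pos ⟨h1, h2⟩]

-- main invariant: A's scan from index i equals B's run scanner from index i,
-- both for a closed state (none) and an open run started at s (some s)
theorem pvMain (ws : List Bool) (l : List Bool) : ∀ i : Nat, ws.drop i = l →
    (pvFinish (pvALoop (PySem.List.enumerate l (i : Int)) [] none) = pvBLoop ws ws.length i) ∧
    (i ≤ ws.length → ∀ s : Int,
      pvFinish (pvALoop (PySem.List.enumerate l (i : Int)) [] (some s)) =
        (s, if pvBInner ws ws.length i = ws.length then (48 : Int) else (pvBInner ws ws.length i : Int))
          :: pvBLoop ws ws.length (pvBInner ws ws.length i)) := by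
  induction l with
  | nil =>
    intro i hd
    have hlen : ws.length ≤ i := by
      have := congrArg List.length hd
      simp [List.length_drop] at this
      omega
    constructor
    · rw [pvBLoop, dif_neg (by omega)]
      simp [PySem.List.enumerate_nil, pvALoop, pvFinish]
    · intro hle s
      have hieq : i = ws.length := le_antisymm hle hlen
      have hstop : pvBInner ws ws.length i = i := pvBInner_stop _ _ _ (by omega)
      rw [hstop, if_pos hieq, pvBLoop, dif_neg (by omega)]
      simp [PySem.List.enumerate_nil, pvALoop, pvFinish]
  | cons x rest ih =>
    intro i hd
    have hlt : i < ws.length := pvLt_of_drop hd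
    have hget : ws[i]? = some x := pvGetElem_of_drop hd
    have hd' : ws.drop (i + 1) = rest := pvDrop_succ_of_drop hd
    have hcast : (i : Int) + 1 = ((i + 1 : Nat) : Int) := by push_cast; ring
    obtain ⟨ihM, ihS⟩ := ih (i + 1) hd'
    rw [PySem.List.enumerate_cons, hcast]
    cases x with
    | false =>
      constructor
      · -- A: state none, w = false → skip; B: slot false → i+1
        rw [pvBLoop, dif_pos hlt, dif_neg (by simp [List.getD_eq_getElem?_getD, hget])]
        simpa [pvALoop] using ihM
      · -- A: close the run at i; B's inner scan stops at i
        intro _ s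
        have hstop : pvBInner ws ws.length i = i := pvBInner_stop _ _ _ (by simp [List.getD_eq_getElem?_getD, hget])
        have hB : pvBLoop ws ws.length i = pvBLoop ws ws.length (i + 1) := by
          rw [pvBLoop, dif_pos hlt, dif_neg (by simp [List.getD_eq_getElem?_getD, hget])]
        rw [hstop, if_neg (by omega), hB]
        simp only [pvALoop, Bool.not_false, Option.isSome_some, Bool.and_self, if_true,
          Option.isNone_some, Bool.false_eq_true, if_false, Option.getD_some]
        rw [pvFinish_acc, ihM]
        simp
    | true =>
      have hstep : pvBInner ws ws.length i = pvBInner ws ws.length (i + 1) :=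
        pvBInner_step _ _ _ hlt (by simp [List.getD_eq_getElem?_getD, hget])
      constructor
      · -- A: open a run at i; B: emit the whole run
        rw [pvBLoop, dif_pos hlt, dif_pos (by simp [List.getD_eq_getElem?_getD, hget])]
        simp only [pvALoop, Option.isNone_none, Bool.and_true, if_true]
        rw [ihS (by omega) (i : Int), hstep]
      · -- A: run stays open; B's inner scan continues
        intro _ s
        rw [hstep]
        simpa [pvALoop] using ihS (by omega) s

-- ===== VERDICT (by name: the statement is the Claim_ definition above) =====
theorem get_work_blocks_spec : Claim_equal_get_work_blocks := by
  intro ws _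
  show get_work_blocks ws = get_work_blocks_alt ws
  have h := (pvMain ws ws 0 (by simp)).1
  simp only [Nat.cast_zero] at h
  unfold get_work_blocks get_work_blocks_alt
  rw [← h]
  rfl
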